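-- pv_equiv track=rewrite | github.com/fernando24164/advent-of-code-2017 | day6/day6.py | get_redistribution
-- ===== SOURCE A (Python) =====
-- from copy import deepcopy
--
-- def get_redistribution(arr_block):
--     times_to_move = max(arr_block)
--
--     index = arr_block.index(times_to_move)
--
--     arr_block[index] = 0
--
--     for i in range(times_to_move):
--         if index + 1 >= len(arr_block):
--             index = 0
--         else:
--             index += 1
--         arr_block[index] += 1
--
--     return deepcopy(arr_block)
-- ===== SOURCE B (Python) =====
-- # O(n) arithmetic redistribution; NOTE: unlike A, B does not mutate arr_block
-- # (the equivalence is about the return value only).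
-- def get_redistribution(arr_block):
--     n = len(arr_block)
--     m = max(arr_block)
--     idx = arr_block.index(m)
--     q, r = divmod(m, n) if m > 0 else (0, 0)
--     return [(0 if j == idx else v) + q + (1 if (j - idx - 1) % n < r else 0)
--             for j, v in enumerate(arr_block)]
-- ===== Notes on version B (the rewrite author's own statement) =====
-- stated objective: faster
-- what changed: Replaces A's token-by-token redistribution loop (one iteration per block of the maximum) by a closed-form arithmetic distribution: every cell gets m//n and the first m%n cells after the max's index get one extra, computed in a single O(n) pass.
-- outside the precondition, e.g. on get_redistribution([]): A raises ValueError, B raises ValueError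
import Mathlib
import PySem

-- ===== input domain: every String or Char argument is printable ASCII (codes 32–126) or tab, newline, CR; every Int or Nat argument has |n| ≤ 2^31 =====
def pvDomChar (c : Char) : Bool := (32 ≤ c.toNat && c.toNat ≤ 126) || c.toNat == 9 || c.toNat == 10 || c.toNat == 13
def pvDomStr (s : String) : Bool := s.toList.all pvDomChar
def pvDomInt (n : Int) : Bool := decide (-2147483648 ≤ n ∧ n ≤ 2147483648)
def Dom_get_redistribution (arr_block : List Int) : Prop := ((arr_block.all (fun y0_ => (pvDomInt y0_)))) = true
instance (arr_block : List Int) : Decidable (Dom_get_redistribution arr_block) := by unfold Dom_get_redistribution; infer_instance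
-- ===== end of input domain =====

-- B replaces A's per-block loop by a closed-form O(n) arithmetic distribution.
-- A mutates its argument in place; the equivalence proved here is about the RETURN value only.

-- ===== PORT A =====
-- literal transliteration of A: max, first index of the max, zero it, then
-- move one block at a time for `times_to_move` iterations (empty loop if max ≤ 0).
def get_redistribution (arr_block : List Int) : List Int :=
  match PySem.List.max? arr_block (fun x => x) with
  | none => []   -- Python raises ValueError on []; excluded by Pre_
  | some times_to_move =>
    match PySem.List.index? arr_block times_to_move with
    | none => []  -- unreachable: the max is a member
    | some index =>
      let arr := PySem.List.pySetD arr_block (index : Int) 0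
      let st := (PySem.List.pyRange 0 times_to_move 1).foldl
        (fun (st : List Int × Nat) _ =>
          let index := if st.2 + 1 ≥ st.1.length then 0 else st.2 + 1
          (PySem.List.pySetD st.1 (index : Int)
            (PySem.List.pyGetD st.1 (index : Int) 0 + 1), index))
        (arr, index)
      st.1

-- ===== PORT B =====
-- literal transliteration of B: q,r = divmod(m,n) (or (0,0) if m ≤ 0), then one
-- comprehension over enumerate(arr_block).
def get_redistribution_alt (arr_block : List Int) : List Int :=
  match PySem.List.max? arr_block (fun x => x) with
  | none => []   -- Python raises ValueError on []; excluded by Pre_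
  | some m =>
    match PySem.List.index? arr_block m with
    | none => []
    | some idx =>
      let n : Int := arr_block.length
      let qr : Int × Int :=
        if m > 0 then (PySem.Int.floordiv m n, PySem.Int.mod m n) else (0, 0)
      (PySem.List.enumerate arr_block 0).map (fun jv =>
        (if jv.1 = (idx : Int) then 0 else jv.2) + qr.1 +
        (if PySem.Int.mod (jv.1 - idx - 1) n < qr.2 then 1 else 0))

-- ===== PRECONDITION & SPEC =====
-- Python's max([]) raises ValueError; both programs need a nonempty list.
def Pre_get_redistribution (arr_block : List Int) : Prop := arr_block ≠ []
instance (arr_block : List Int) : Decidable (Pre_get_redistribution arr_block) := by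
  unfold Pre_get_redistribution; infer_instance
def pvWitness_get_redistribution : List Int := [0, 2, 7, 0]

def Spec_get_redistribution (arr_block : List Int) (out : List Int) : Prop := out = get_redistribution_alt arr_block
instance (arr_block : List Int) (out : List Int) : Decidable (Spec_get_redistribution arr_block out) := by unfold Spec_get_redistribution; infer_instance

-- ===== CLAIM (what is proved, stated in full; the proofs are below) =====
def Claim_equal_get_redistribution : Prop := ∀ (arr_block : List Int), Dom_get_redistribution arr_block → Pre_get_redistribution arr_block → Spec_get_redistribution arr_block (get_redistribution arr_block)

-- ===== LEMMAS AND PROOFS =====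

def pvStep (st : List Int × Nat) : List Int × Nat :=
  let index := if st.2 + 1 ≥ st.1.length then 0 else st.2 + 1
  (st.1.set index (st.1.getD index 0 + 1), index)
def pvCnt (c n i j : Nat) : Nat := (List.range i).countP (fun k => (c + k) % n == j)
theorem pvCnt_zero (c n j : Nat) : pvCnt c n 0 j = 0 := by simp [pvCnt]
theorem pvCnt_succ (c n i j : Nat) :
    pvCnt c n (i + 1) j = pvCnt c n i j + (if (c + i) % n = j then 1 else 0) := by
  simp [pvCnt, List.range_succ, List.countP_append]
theorem pv_getD_map_range (f : Nat → Int) (n p : Nat) (hp : p < n) :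
    ((List.range n).map f).getD p 0 = f p := by
  rw [List.getD_eq_getElem _ _ (by simpa using hp)]
  simp

theorem pvStep_iterate (n : Nat) (base : List Int) (hnb : base.length = n) (idx0 : Nat)
    (hidx : idx0 < n) (i : Nat) :
    pvStep^[i] (base, idx0) =
      ((List.range n).map (fun j => base.getD j 0 + (pvCnt (idx0 + 1) n i j : Int)),
       (idx0 + i) % n) := by
  have hn0 : 0 < n := lt_of_le_of_lt (Nat.zero_le _) hidx
  induction i with
  | zero =>
    simp only [Function.iterate_zero_apply]
    refine congrArg₂ Prod.mk ?_ ?_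
    · apply List.ext_getElem
      · simp [hnb]
      · intro j h1 h2
        have hj : j < n := by omega
        rw [List.getElem_map, List.getElem_range, pvCnt_zero,
          List.getD_eq_getElem base 0 (by omega)]
        simp
    · simp [Nat.mod_eq_of_lt hidx]
  | succ i ih =>
    rw [Function.iterate_succ_apply', ih]
    have hx : (idx0 + i) % n < n := Nat.mod_lt _ hn0
    have hq : (idx0 + i + 1) % n < n := Nat.mod_lt _ hn0
    have h2 : (idx0 + i + 1) % n = ((idx0 + i) % n + 1) % n := (Nat.mod_add_mod (idx0 + i) n 1).symm
    have hp : (if (idx0 + i) % n + 1 ≥ n then 0 else (idx0 + i) % n + 1) = (idx0 + i + 1) % n := by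
      rw [h2]
      by_cases h : (idx0 + i) % n + 1 ≥ n
      · rw [if_pos h, show (idx0 + i) % n + 1 = n by omega, Nat.mod_self]
      · rw [if_neg h]
        exact (Nat.mod_eq_of_lt (by omega)).symm
    simp only [pvStep, List.length_map, List.length_range, hp]
    refine congrArg₂ Prod.mk ?_ rfl
    apply List.ext_getElem
    · simp
    · intro j h1 h2'
      have hj : j < n := by simpa using h2'
      have hadd : idx0 + 1 + i = idx0 + i + 1 := by omega
      have hcs : pvCnt (idx0 + 1) n (i + 1) j
          = pvCnt (idx0 + 1) n i j + (if (idx0 + i + 1) % n = j then 1 else 0) := by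
        rw [pvCnt_succ, hadd]
      rw [List.getElem_set, List.getElem_map, List.getElem_range,
        pv_getD_map_range _ _ _ hq]
      by_cases h : (idx0 + i + 1) % n = j
      · rw [if_pos h, h, List.getElem_map, List.getElem_range, hcs, if_pos h]
        push_cast
        ring
      · rw [if_neg h, List.getElem_map, List.getElem_range, hcs, if_neg h]
        simp

theorem pv_mod_shift (n j c : Nat) (hc : c ≤ n) (hn : 0 < n) :
    (j + n - c % n) % n = (j + n - c) % n := by
  by_cases h : c = n
  · subst h
    rw [Nat.mod_self, Nat.sub_zero, Nat.add_mod_right, Nat.add_sub_cancel]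
  · rw [Nat.mod_eq_of_lt (show c < n by omega)]

theorem pvCnt_closed (n : Nat) (hn : 0 < n) (c j : Nat) (hj : j < n) (i : Nat) :
    pvCnt c n i j = i / n + (if (j + n - c % n) % n < i % n then 1 else 0) := by
  induction i with
  | zero => simp [pvCnt_zero]
  | succ i ih =>
    have ha : c % n < n := Nat.mod_lt _ hn
    have hb : i % n < n := Nat.mod_lt _ hn
    have hD : (j + n - c % n) % n = if c % n ≤ j then j - c % n else j + n - c % n := by
      by_cases h : c % n ≤ j
      · rw [show j + n - c % n = (j - c % n) + n by omega, Nat.add_mod_right,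
          Nat.mod_eq_of_lt (by omega), if_pos h]
      · rw [Nat.mod_eq_of_lt (by omega), if_neg h]
    have hab : (c % n + i % n) % n
        = if c % n + i % n < n then c % n + i % n else c % n + i % n - n := by
      by_cases h : c % n + i % n < n
      · rw [Nat.mod_eq_of_lt h, if_pos h]
      · rw [show c % n + i % n = (c % n + i % n - n) + n by omega, Nat.add_mod_right,
          Nat.mod_eq_of_lt (by omega), if_neg (by omega)]
        omega
    have key2 : ((c + i) % n = j) ↔ ((j + n - c % n) % n = i % n) := by
      rw [Nat.add_mod c i n, hD, hab]
      split_ifs <;> omega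
    have hdm : n * (i / n) + i % n = i := Nat.div_add_mod i n
    have hms : n * (i / n + 1) = n * (i / n) + n := Nat.mul_succ n (i / n)
    have hsucc_mod : (i + 1) % n = if i % n + 1 = n then 0 else i % n + 1 := by
      by_cases h : i % n + 1 = n
      · rw [show i + 1 = n * (i / n + 1) by omega, Nat.mul_mod_right, if_pos h]
      · rw [show i + 1 = n * (i / n) + (i % n + 1) by omega, Nat.mul_add_mod,
          Nat.mod_eq_of_lt (by omega), if_neg h]
    have hsucc_div : (i + 1) / n = if i % n + 1 = n then i / n + 1 else i / n := by
      by_cases h : i % n + 1 = n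
      · rw [show i + 1 = n * (i / n + 1) by omega, Nat.mul_div_cancel_left _ hn, if_pos h]
      · rw [show i + 1 = n * (i / n) + (i % n + 1) by omega, Nat.mul_add_div hn,
          Nat.div_eq_of_lt (show i % n + 1 < n by omega), if_neg h]
        omega
    rw [pvCnt_succ, ih, hsucc_mod, hsucc_div, if_congr key2 rfl rfl]
    have hDlt : (j + n - c % n) % n < n := Nat.mod_lt _ hn
    split_ifs <;> omega

theorem pv_index?_lt (l : List Int) (v : Int) (i : Nat)
    (h : PySem.List.index? l v = some i) : i < l.length := by
  induction l generalizing i with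
  | nil =>
    rw [(PySem.List.index?_eq_none_iff ([] : List Int) v).mpr (by simp)] at h
    cases h
  | cons x t ih =>
    by_cases hx : x = v
    · subst hx
      rw [PySem.List.index?_cons_self] at h
      simp at h
      simp [← h]
    · rw [PySem.List.index?_cons_of_ne t hx] at h
      rcases Option.map_eq_some_iff.mp h with ⟨i', hi', rfl⟩
      have := ih i' hi'
      simp
      omega

theorem pv_foldl_const_iterate {α β : Type} (f : α → α) (l : List β) (init : α) :
    l.foldl (fun s _ => f s) init = f^[l.length] init := by
  induction l generalizing init with
  | nil => rfl
  | cons x t ih => simp [List.foldl_cons, ih, Function.iterate_succ_apply]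

-- ===== VERDICT (by name: the statement is the Claim_ definition above) =====
theorem get_redistribution_spec : Claim_equal_get_redistribution := by
  intro arr _hdom hpre
  have hne : arr ≠ [] := hpre
  unfold Spec_get_redistribution
  rcases hmaxo : PySem.List.max? arr (fun x => x) with _ | m
  · exact absurd ((PySem.List.max?_eq_none_iff arr _).mp hmaxo) hne
  have hmem : m ∈ arr := PySem.List.max?_mem hmaxo
  rcases hio : PySem.List.index? arr m with _ | idx
  · exact absurd hmem ((PySem.List.index?_eq_none_iff arr m).mp hio)
  have hidx : idx < arr.length := pv_index?_lt arr m idx hio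
  have hn0 : 0 < arr.length := by omega
  simp only [get_redistribution, get_redistribution_alt, hmaxo, hio]
  have hfun : (fun (st : List Int × Nat) (_ : Int) =>
      (PySem.List.pySetD st.1 (↑(if st.2 + 1 ≥ st.1.length then 0 else st.2 + 1))
          (PySem.List.pyGetD st.1 (↑(if st.2 + 1 ≥ st.1.length then 0 else st.2 + 1)) 0 + 1),
        if st.2 + 1 ≥ st.1.length then 0 else st.2 + 1))
      = (fun (st : List Int × Nat) (_ : Int) => pvStep st) := by
    funext st x
    simp only [pvStep, PySem.List.pySetD_natCast, PySem.List.pyGetD_natCast]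
  rw [hfun, pv_foldl_const_iterate, PySem.List.length_pyRange_one, Int.sub_zero,
    PySem.List.pySetD_natCast]
  by_cases hm : 0 < m
  · -- positive maximum: the loop runs m.toNat times
    obtain ⟨M, rfl⟩ : ∃ M : Nat, m = (M : Int) := ⟨m.toNat, (Int.toNat_of_nonneg hm.le).symm⟩
    rw [Int.toNat_natCast,
      pvStep_iterate arr.length (arr.set idx 0) (by simp) idx hidx M, if_pos hm]
    apply List.ext_getElem
    · simp [PySem.List.length_enumerate]
    · intro k h1 h2
      have hk : k < arr.length := by simpa using h1
      rw [List.getElem_map, List.getElem_range, List.getElem_map, PySem.List.getElem_enumerate]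
      dsimp only
      rw [pvCnt_closed arr.length hn0 (idx + 1) k hk M,
        pv_mod_shift arr.length k (idx + 1) (by omega) hn0]
      simp only [PySem.Int.floordiv_natCast, PySem.Int.mod_natCast]
      have hmod : PySem.Int.mod ((0:Int) + ↑k - ↑idx - 1) ↑arr.length
          = (((k + arr.length - (idx + 1)) % arr.length : Nat) : Int) := by
        rw [PySem.Int.mod_eq_emod_of_pos (by exact_mod_cast hn0)]
        rw [show ((0:Int) + ↑k - ↑idx - 1) % (↑arr.length : Int)
            = (((0:Int) + ↑k - ↑idx - 1) + ↑arr.length) % ↑arr.length from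
          (Int.add_emod_right _ _).symm]
        rw [show ((0:Int) + ↑k - ↑idx - 1 + ↑arr.length)
            = ((k + arr.length - (idx + 1) : Nat) : Int) by omega]
        exact_mod_cast rfl
      rw [hmod]
      simp only [Nat.cast_lt]
      rw [List.getD_eq_getElem _ 0 (by simpa using hk), List.getElem_set]
      have hcond : ((0:Int) + ↑k = ↑idx) ↔ idx = k := by omega
      rw [if_congr hcond rfl rfl]
      by_cases hki : idx = k
      · simp only [if_pos hki]
        by_cases hC : (k + arr.length - (idx + 1)) % arr.length < M % arr.length
        · simp only [if_pos hC]; push_cast; ring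
        · simp only [if_neg hC]; push_cast; ring
      · simp only [if_neg hki]
        by_cases hC : (k + arr.length - (idx + 1)) % arr.length < M % arr.length
        · simp only [if_pos hC]; push_cast; ring
        · simp only [if_neg hC]; push_cast; ring
  · -- non-positive maximum: the loop body never runs
    have hM0 : m.toNat = 0 := by omega
    rw [hM0, Function.iterate_zero_apply, if_neg hm]
    dsimp only
    apply List.ext_getElem
    · simp [PySem.List.length_enumerate]
    · intro k h1 h2
      have hk : k < arr.length := by simpa using h1
      rw [List.getElem_map, PySem.List.getElem_enumerate]
      dsimp only
      have hmodnn : 0 ≤ PySem.Int.mod ((0:Int) + ↑k - ↑idx - 1) ↑arr.length := by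
        rw [PySem.Int.mod_eq_emod_of_pos (by exact_mod_cast hn0)]
        exact Int.emod_nonneg _ (by exact_mod_cast hn0.ne')
      have hni : ¬ (PySem.Int.mod ((0:Int) + ↑k - ↑idx - 1) ↑arr.length < 0) := by omega
      rw [if_neg hni, List.getElem_set]
      have hcond : ((0:Int) + ↑k = ↑idx) ↔ idx = k := by omega
      rw [if_congr hcond rfl rfl]
      by_cases hki : idx = k
      · simp only [if_pos hki]; ring
      · simp only [if_neg hki]; ring
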